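-- pv_equiv track=rewrite | github.com/nttkor/programmers | pccp_ex/11alphabet.py | solution
-- ===== SOURCE A (Python) =====
-- def solution(input_string):
--     answer = ''
--     chk = dict()
--     prev = ''
--     for ch in input_string:
--         if prev == ch:
--             n,d = chk[ch]
--             chk[ch] = n+1,d
--         else:
--             if ch in chk:
--                 n,d = chk[ch]
--                 chk[ch] = n+1,d+1
--             else:
--                 chk[ch] = 1, 1
--         prev = ch
--         two = []
--         for k, (n, d) in chk.items():
--             if n >=2 and d >= 2:
--                 two.append(k)
--         two.sort()
--         answer = ''.join(two)
--         if answer == '':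
--             answer = 'N'
--     return answer
-- ===== SOURCE B (Python) =====
-- def solution(input_string):
--     # Two-phase: collapse the string to its run-heads (one char per maximal run),
--     # count runs per character, keep characters with >= 2 runs, sorted.
--     if not input_string:
--         return ''
--     heads = []
--     i = 0
--     n = len(input_string)
--     while i < n:
--         heads.append(input_string[i])
--         j = i + 1
--         while j < n and input_string[j] == input_string[i]:
--             j += 1
--         i = j
--     runs = {}
--     for c in heads:
--         runs[c] = runs.get(c, 0) + 1
--     result = ''.join(sorted(c for c in runs if runs[c] >= 2))
--     return result if result else 'N'
-- ===== Notes on version B (the rewrite author's own statement) =====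
-- stated objective: faster
-- what changed: A interleaves a char->(total,runs) dict with a full filter+sort+join recomputation of the answer after every character; B does one pass to collapse the string into its run-heads, counts runs per character in a dict, then filters, sorts and joins once.
import Mathlib
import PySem

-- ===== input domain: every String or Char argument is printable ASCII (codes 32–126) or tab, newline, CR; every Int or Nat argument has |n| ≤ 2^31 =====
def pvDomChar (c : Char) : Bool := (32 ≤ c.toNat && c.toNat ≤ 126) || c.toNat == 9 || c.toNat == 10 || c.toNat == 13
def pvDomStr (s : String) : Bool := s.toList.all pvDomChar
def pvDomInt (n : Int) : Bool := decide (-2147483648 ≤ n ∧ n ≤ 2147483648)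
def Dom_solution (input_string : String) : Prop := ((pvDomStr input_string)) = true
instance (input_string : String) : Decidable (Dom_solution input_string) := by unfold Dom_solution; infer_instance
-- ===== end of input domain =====

-- B replaces A's per-character dict update plus full filter/sort/join recomputation by one
-- runs-collapse pass, a run counter, and a single final filter/sort/join (objective: faster).

-- ===== PORT A =====
-- one loop iteration of A: update chk, remember prev, recompute answer from chk
def solnStepA (st : PySem.Dict Char (Int × Int) × Option Char × List Char) (ch : Char) :
    PySem.Dict Char (Int × Int) × Option Char × List Char :=
  let chk := st.1
  let prev := st.2.1
  let chk' :=
    if prev = some ch then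
      -- chk[ch]: the key is always present when prev == ch, so Python never raises here
      let nd := (chk.get? ch).getD (0, 0)
      chk.insert ch (nd.1 + 1, nd.2)
    else
      if chk.contains ch then
        let nd := (chk.get? ch).getD (0, 0)
        chk.insert ch (nd.1 + 1, nd.2 + 1)
      else
        chk.insert ch (1, 1)
  -- two = []; for k,(n,d) in chk.items(): if n>=2 and d>=2: two.append(k); two.sort()
  let two := chk'.items.foldl
    (fun acc kv => if (decide (2 ≤ kv.2.1) && decide (2 ≤ kv.2.2)) = true then acc ++ [kv.1] else acc) []
  let two := PySem.List.sorted two (fun x => x)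
  let answer := if two = [] then ['N'] else two
  (chk', some ch, answer)

def solution (input_string : String) : String :=
  let st := input_string.toList.foldl solnStepA ((PySem.Dict.empty : PySem.Dict Char (Int × Int)), none, ([] : List Char))
  String.ofList st.2.2

-- ===== PORT B =====
-- the outer while-loop of B: emit the head of each maximal run, skip the rest of the run
def runHeads : List Char → List Char
  | [] => []
  | c :: rest => c :: runHeads (rest.dropWhile (· == c))
termination_by l => l.length
decreasing_by
  have := List.length_dropWhile_le (· == c) rest
  simp only [List.length_cons]; omega

def solution_alt (input_string : String) : String :=
  if input_string.toList = [] then ""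
  else
    let heads := runHeads input_string.toList
    -- runs[c] = runs.get(c, 0) + 1
    let runs := heads.foldl (fun d c => d.insert c (d.getD c 0 + 1)) (PySem.Dict.empty : PySem.Dict Char Int)
    let result := PySem.List.sorted (runs.keys.filter (fun c => decide (2 ≤ runs.getD c 0))) (fun x => x)
    if result = [] then "N" else String.ofList result

-- ===== PRECONDITION & SPEC =====
def Spec_solution (input_string : String) (out : String) : Prop := out = solution_alt input_string
instance (input_string : String) (out : String) : Decidable (Spec_solution input_string out) := by unfold Spec_solution; infer_instance

-- ===== CLAIM (what is proved, stated in full; the proofs are below) =====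
def Claim_equal_solution : Prop := ∀ (input_string : String), Dom_solution input_string → Spec_solution input_string (solution input_string)

-- ===== LEMMAS AND PROOFS =====

theorem runHeads_sublist (l : List Char) : List.Sublist (runHeads l) l := by
  induction l using runHeads.induct with
  | case1 => simp [runHeads]
  | case2 c rest ih =>
    rw [runHeads]
    exact List.Sublist.cons₂ c (ih.trans (List.dropWhile_sublist _))

theorem runHeads_append_singleton (l : List Char) (ch : Char) :
    runHeads (l ++ [ch]) = runHeads l ++ (if l.getLast? = some ch then [] else [ch]) := by
  induction l using runHeads.induct with
  | case1 => simp [runHeads]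
  | case2 c rest ih =>
    rw [List.cons_append, runHeads, List.dropWhile_append]
    by_cases h : (rest.dropWhile (· == c)).isEmpty
    · have hdrop : rest.dropWhile (· == c) = [] := List.isEmpty_iff.1 h
      have hall : ∀ x ∈ rest, x = c := by
        intro x hx
        have := (List.dropWhile_eq_nil_iff).1 hdrop x hx
        simpa using this
      have hlast : (c :: rest).getLast? = some c := by
        cases hr : rest.reverse with
        | nil => simp [List.reverse_eq_nil_iff.1 hr]
        | cons y ys =>
          have hy : y ∈ rest := by
            have : y ∈ rest.reverse := by rw [hr]; exact List.mem_cons_self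
            simpa using this
          rw [List.getLast?_cons, List.getLast?_eq_head?_reverse, hr]
          simp [hall y hy]
      rw [if_pos h, hlast]
      conv_rhs => rw [runHeads]
      rw [hdrop]
      by_cases hc : ch = c
      · simp [hc, runHeads, List.dropWhile]
      · have hne : ¬ ((ch == c) = true) := by simp [hc]
        simp [hne, runHeads, Ne.symm hc]
    · rw [if_neg h]
      have hdne : rest.dropWhile (· == c) ≠ [] := by simpa [List.isEmpty_iff] using h
      have hrne : rest ≠ [] := by intro hr; simp [hr] at hdne
      have hlast2 : rest.getLast? = (rest.dropWhile (· == c)).getLast? := by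
        conv_lhs => rw [← List.takeWhile_append_dropWhile (p := (· == c)) (l := rest)]
        exact List.getLast?_append_of_ne_nil _ hdne
      have hlast3 : (c :: rest).getLast? = rest.getLast? := List.getLast?_append_of_ne_nil [c] hrne
      rw [ih]
      conv_rhs => rw [runHeads]
      rw [hlast3, hlast2, List.cons_append]

-- the headcount of a char never exceeds its total count
theorem runHeads_count_le (l : List Char) (c : Char) : (runHeads l).count c ≤ l.count c :=
  (runHeads_sublist l).count_le c

-- invariant of A's loop: prev is the last char seen, and chk maps each seen char
-- to its (total count, number of runs) in the prefix
theorem invA (p : List Char) :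
    (p.foldl solnStepA ((PySem.Dict.empty : PySem.Dict Char (Int × Int)), none, ([] : List Char))).2.1 = p.getLast? ∧
    (p.foldl solnStepA ((PySem.Dict.empty : PySem.Dict Char (Int × Int)), none, ([] : List Char))).1.keys.Nodup ∧
    ∀ c : Char, (p.foldl solnStepA ((PySem.Dict.empty : PySem.Dict Char (Int × Int)), none, ([] : List Char))).1.get? c =
      if c ∈ p then some ((p.count c : Int), ((runHeads p).count c : Int)) else none := by
  induction p using List.reverseRecOn with
  | nil =>
    refine ⟨rfl, PySem.Dict.nodup_keys_empty, fun c => ?_⟩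
    simp [PySem.Dict.get?_empty]
  | append_singleton p ch ih =>
    obtain ⟨hprev, hnodup, hget⟩ := ih
    rw [List.foldl_append]
    simp only [List.foldl_cons, List.foldl_nil]
    set st := p.foldl solnStepA ((PySem.Dict.empty : PySem.Dict Char (Int × Int)), none, ([] : List Char)) with hst
    have h2 : (solnStepA st ch).2.1 = some ch := rfl
    have hlast' : (p ++ [ch]).getLast? = some ch := by simp
    by_cases hp : st.2.1 = some ch
    · -- prev == ch : repeated char inside a run
      have hpl : p.getLast? = some ch := hprev.symm.trans hp
      have hmem : ch ∈ p := List.mem_of_getLast? hpl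
      have hgch : st.1.get? ch = some ((p.count ch : Int), ((runHeads p).count ch : Int)) := by
        rw [hget ch, if_pos hmem]
      have hrh : runHeads (p ++ [ch]) = runHeads p := by
        rw [runHeads_append_singleton, hpl]; simp
      have h1 : (solnStepA st ch).1 = st.1.insert ch ((p.count ch : Int) + 1, ((runHeads p).count ch : Int)) := by
        simp [solnStepA, hp, hgch]
      refine ⟨h2.trans hlast'.symm, ?_, ?_⟩
      · rw [h1]; exact PySem.Dict.nodup_keys_insert _ _ _ hnodup
      · intro c
        rw [h1, PySem.Dict.get?_insert]
        by_cases hc : c = ch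
        · rw [if_pos hc, if_pos (show c ∈ p ++ [ch] by simp [hc]), hrh]
          subst hc
          push_cast [List.count_append]; simp
        · rw [if_neg hc, hget c, hrh, List.count_append]
          simp [hc, Ne.symm hc]
    · -- prev != ch : a new run of ch starts
      have hlastne : p.getLast? ≠ some ch := hprev ▸ hp
      have hrh : runHeads (p ++ [ch]) = runHeads p ++ [ch] := by
        rw [runHeads_append_singleton, if_neg hlastne]
      by_cases hin : st.1.contains ch
      · have hmem : ch ∈ p := by
          by_contra hnot
          have := hget ch
          rw [if_neg hnot] at this
          rw [PySem.Dict.contains_eq_isSome_get?, this] at hin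
          simp at hin
        have hgch : st.1.get? ch = some ((p.count ch : Int), ((runHeads p).count ch : Int)) := by
          rw [hget ch, if_pos hmem]
        have h1 : (solnStepA st ch).1 = st.1.insert ch ((p.count ch : Int) + 1, ((runHeads p).count ch : Int) + 1) := by
          simp [solnStepA, hp, hin, hgch]
        refine ⟨h2.trans hlast'.symm, ?_, ?_⟩
        · rw [h1]; exact PySem.Dict.nodup_keys_insert _ _ _ hnodup
        · intro c
          rw [h1, PySem.Dict.get?_insert]
          by_cases hc : c = ch
          · rw [if_pos hc, if_pos (show c ∈ p ++ [ch] by simp [hc]), hrh]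
            subst hc
            push_cast [List.count_append]; simp
          · rw [if_neg hc, hget c, hrh, List.count_append, List.count_append]
            simp [hc, Ne.symm hc]
      · have hnmem : ch ∉ p := by
          by_contra hmem
          have := hget ch
          rw [if_pos hmem] at this
          rw [PySem.Dict.contains_eq_isSome_get?, this] at hin
          simp at hin
        have hzero : p.count ch = 0 := List.count_eq_zero.2 hnmem
        have hhzero : (runHeads p).count ch = 0 := by
          have := runHeads_count_le p ch; omega
        have h1 : (solnStepA st ch).1 = st.1.insert ch (1, 1) := by
          simp [solnStepA, hp, hin]
        refine ⟨h2.trans hlast'.symm, ?_, ?_⟩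
        · rw [h1]; exact PySem.Dict.nodup_keys_insert _ _ _ hnodup
        · intro c
          rw [h1, PySem.Dict.get?_insert]
          by_cases hc : c = ch
          · rw [if_pos hc, if_pos (show c ∈ p ++ [ch] by simp [hc]), hrh]
            subst hc
            simp [List.count_append, hzero, hhzero]
          · rw [if_neg hc, hget c, hrh, List.count_append, List.count_append]
            simp [hc, Ne.symm hc]

-- the answer recomputed by A at the end of each iteration, as a function of chk
def ansListA (d : PySem.Dict Char (Int × Int)) : List Char :=
  let two := d.items.foldl
    (fun acc kv => if (decide (2 ≤ kv.2.1) && decide (2 ≤ kv.2.2)) = true then acc ++ [kv.1] else acc) []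
  let two := PySem.List.sorted two (fun x => x)
  if two = [] then ['N'] else two

theorem stepA_ans (st : PySem.Dict Char (Int × Int) × Option Char × List Char) (ch : Char) :
    (solnStepA st ch).2.2 = ansListA (solnStepA st ch).1 := rfl

theorem solution_eq_of_concat (L : List Char) (b : Char) (s : String) (hs : s.toList = L ++ [b]) :
    solution s = String.ofList (ansListA
      ((L ++ [b]).foldl solnStepA ((PySem.Dict.empty : PySem.Dict Char (Int × Int)), none, ([] : List Char))).1) := by
  unfold solution
  rw [hs, List.foldl_append]
  simp only [List.foldl_cons, List.foldl_nil]
  rw [stepA_ans]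

theorem main_eq (s : String) : solution s = solution_alt s := by
  rcases List.eq_nil_or_concat s.toList with hnil | ⟨L, b, hcat⟩
  · unfold solution solution_alt
    rw [hnil]
    rfl
  · rw [List.concat_eq_append] at hcat
    obtain ⟨hprev, hnodup, hget⟩ := invA (L ++ [b])
    rw [solution_eq_of_concat L b s hcat]
    set p : List Char := L ++ [b] with hp
    set T := p.foldl solnStepA ((PySem.Dict.empty : PySem.Dict Char (Int × Int)), none, ([] : List Char)) with hT
    -- A's unsorted key list
    have hAK : T.1.items.foldl
        (fun acc kv => if (decide (2 ≤ kv.2.1) && decide (2 ≤ kv.2.2)) = true then acc ++ [kv.1] else acc) [] =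
        (T.1.items.filter (fun kv => decide (2 ≤ kv.2.1) && decide (2 ≤ kv.2.2))).map (fun kv => kv.1) := by
      rw [PySem.List.foldl_append_if (fun kv => decide (2 ≤ kv.2.1) && decide (2 ≤ kv.2.2))
        (fun kv => kv.1) T.1.items []]
      simp
    set AK := (T.1.items.filter (fun kv => decide (2 ≤ kv.2.1) && decide (2 ≤ kv.2.2))).map
      (fun kv => kv.1) with hAKdef
    have hAmem : ∀ c : Char, c ∈ AK ↔ 2 ≤ (runHeads p).count c := by
      intro c
      rw [hAKdef]
      simp only [List.mem_map, List.mem_filter]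
      constructor
      · rintro ⟨⟨k, v⟩, ⟨hmemi, hcond⟩, hk⟩
        subst hk
        have hgc := PySem.Dict.get?_of_mem_items T.1 hmemi hnodup
        rw [hget k] at hgc
        by_cases hkp : k ∈ p
        · rw [if_pos hkp] at hgc
          have hv := (Option.some.inj hgc).symm
          subst hv
          simp only [Bool.and_eq_true, decide_eq_true_eq] at hcond
          exact_mod_cast hcond.2
        · rw [if_neg hkp] at hgc; cases hgc
      · intro hc
        have hcp : (runHeads p).count c ≤ p.count c := runHeads_count_le p c
        have hmemp : c ∈ p := List.count_pos_iff.1 (by omega)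
        have hgc : T.1.get? c = some ((p.count c : Int), ((runHeads p).count c : Int)) := by
          rw [hget c, if_pos hmemp]
        refine ⟨(c, ((p.count c : Int), ((runHeads p).count c : Int))),
          ⟨PySem.Dict.mem_items_of_get?_eq_some T.1 hgc, ?_⟩, rfl⟩
        simp only [Bool.and_eq_true, decide_eq_true_eq]
        constructor
        · exact_mod_cast (by omega : 2 ≤ p.count c)
        · exact_mod_cast hc
    have hAnodup : AK.Nodup := by
      have hsub : List.Sublist AK (T.1.items.map (fun kv => kv.1)) :=
        List.Sublist.map _ List.filter_sublist
      have : (T.1.items.map (fun kv => kv.1)).Nodup := by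
        rw [← PySem.Dict.keys.eq_1]; exact hnodup
      exact this.sublist hsub
    -- B's unsorted key list
    have hcounter : (runHeads p).foldl (fun d c => d.insert c (d.getD c 0 + 1))
        (PySem.Dict.empty : PySem.Dict Char Int) = PySem.Dict.counter (runHeads p) :=
      PySem.Dict.foldl_insert_getD_add_one_eq_counter (runHeads p)
    set BK := ((PySem.Dict.counter (runHeads p)).keys.filter
      (fun c => decide (2 ≤ (PySem.Dict.counter (runHeads p)).getD c 0))) with hBKdef
    have hBmem : ∀ c : Char, c ∈ BK ↔ 2 ≤ (runHeads p).count c := by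
      intro c
      rw [hBKdef]
      simp only [List.mem_filter, PySem.Dict.keys_counter, PySem.Set.mem_ofList,
        PySem.Dict.getD_counter, decide_eq_true_eq]
      constructor
      · rintro ⟨-, hc⟩; exact_mod_cast hc
      · intro hc
        refine ⟨List.count_pos_iff.1 (by omega), by exact_mod_cast hc⟩
    have hBnodup : BK.Nodup := by
      rw [hBKdef, PySem.Dict.keys_counter]
      exact (PySem.Set.nodup_ofList _).filter _
    have hperm : AK.Perm BK :=
      (List.perm_ext_iff_of_nodup hAnodup hBnodup).2 (fun c => by rw [hAmem c, hBmem c])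
    have hsorted : PySem.List.sorted AK (fun x => x) = PySem.List.sorted BK (fun x => x) :=
      (PySem.List.sorted_id_eq_sorted_id_iff_perm AK BK).2 hperm
    -- assemble both sides
    unfold solution_alt
    have hne : ¬ (p = []) := by simp [hp]
    rw [hcat, if_neg hne]
    simp only [hcounter]
    unfold ansListA
    simp only [hAK, ← hBKdef, hsorted]
    by_cases hres : PySem.List.sorted BK (fun x => x) = []
    · rw [if_pos hres, if_pos hres]
    · rw [if_neg hres, if_neg hres]

-- ===== VERDICT (by name: the statement is the Claim_ definition above) =====
theorem solution_spec : Claim_equal_solution := by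
  intro s _
  unfold Spec_solution
  exact main_eq s
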